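-- pv_equiv track=rewrite | github.com/gustavonaldoni/python-codebase | mathematics/number_theory/euclidean/euclidean.py | _gcd_steps
-- ===== SOURCE A (Python) =====
-- def _gcd_steps(number1: int, number2: int) -> int:
--     """
--     Calculates the steps involved on the Euclidean Algorithm
--     of gcd(number1, number2). Returns a list of tuples of the form
--     (largest_number, quotient, smallest_number, remainder).
--     """
--     if not isinstance(number1, int) or not isinstance(number2, int):
--         raise TypeError(f"Cannot calculate gcd() of non integers.")
--
--     if number1 == number2 and number2 == 0:
--         raise ValueError("Cannot calculate gcd(0,0).")
--
--     result = []
--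
--     # largest_number = quotient * smallest_number + remainder
--
--     largest_number = max(number1, number2)
--     smallest_number = min(number1, number2)
--
--     quotient = largest_number // smallest_number
--     remainder = largest_number % smallest_number
--
--     result.append((largest_number, quotient, smallest_number, remainder))
--
--     if remainder == 0:
--         return result
--
--     while True:
--         old_remainder = remainder
--
--         largest_number = smallest_number
--         smallest_number = remainder
--
--         quotient = largest_number // smallest_number
--         remainder = largest_number % smallest_number
--
--         result.append((largest_number, quotient, smallest_number, remainder))
--
--         if remainder == 0:
--             return result
-- ===== SOURCE B (Python) =====
-- def _gcd_steps(number1: int, number2: int) -> int: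
--     """Recursive decomposition: the step list is produced by a helper that
--     recurses along the Euclidean division chain instead of a while-loop
--     accumulator."""
--     if not isinstance(number1, int) or not isinstance(number2, int):
--         raise TypeError(f"Cannot calculate gcd() of non integers.")
--
--     if number1 == number2 and number2 == 0:
--         raise ValueError("Cannot calculate gcd(0,0).")
--
--     return _steps(max(number1, number2), min(number1, number2))
--
--
-- def _steps(a: int, b: int) -> list:
--     q, r = divmod(a, b)
--     if r == 0:
--         return [(a, q, b, r)]
--     return [(a, q, b, r)] + _steps(b, r)
-- ===== Notes on version B (the rewrite author's own statement) =====
-- stated objective: simpler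
-- what changed: The while-loop with a mutated (largest, smallest, remainder, result) state and list appends is replaced by a recursive helper steps(a, b) that returns [(a, q, b, r)] and prepends it to steps(b, r), threading the recursion along the Euclidean division chain.
import Mathlib
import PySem

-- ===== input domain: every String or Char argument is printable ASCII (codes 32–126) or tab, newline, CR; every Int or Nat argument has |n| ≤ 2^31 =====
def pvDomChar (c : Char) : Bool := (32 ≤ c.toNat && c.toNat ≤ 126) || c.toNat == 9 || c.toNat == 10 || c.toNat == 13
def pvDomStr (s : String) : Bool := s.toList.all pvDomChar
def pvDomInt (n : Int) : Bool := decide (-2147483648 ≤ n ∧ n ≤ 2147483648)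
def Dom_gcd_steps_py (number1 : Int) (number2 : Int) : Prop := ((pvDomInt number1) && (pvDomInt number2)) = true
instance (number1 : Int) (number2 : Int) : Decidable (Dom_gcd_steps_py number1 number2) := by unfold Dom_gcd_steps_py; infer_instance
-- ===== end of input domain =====

-- B replaces A's while-loop accumulator by a recursive helper over the Euclidean division chain (objective: simpler).


-- Python's a % 0 is an error; in Lean PySem.Int.mod a 0 = a (total). This fact drives both termination measures.
theorem pv_mod_zero (a : Int) : PySem.Int.mod a 0 = a := by
  simp [PySem.Int.mod]

theorem pv_mod_natAbs_lt (a b : Int) (h : b ≠ 0) : (PySem.Int.mod a b).natAbs < b.natAbs := by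
  rcases lt_trichotomy b 0 with hb | hb | hb
  · have := PySem.Int.mod_neg_bounds (a := a) hb; omega
  · omega
  · have h1 := PySem.Int.mod_nonneg (a := a) hb
    have h2 := PySem.Int.mod_lt (a := a) hb
    omega

-- ===== PORT A =====
-- the 'while True' loop: state (largest, smallest, remainder, result) at loop entry
def pvLoopA (largest smallest remainder : Int) (result : List (Int × Int × Int × Int)) :
    List (Int × Int × Int × Int) :=
  let _old_remainder := remainder
  let largest' := smallest
  let smallest' := remainder
  let quotient := PySem.Int.floordiv largest' smallest'
  let remainder' := PySem.Int.mod largest' smallest'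
  let result' := result ++ [(largest', quotient, smallest', remainder')]
  if remainder' = 0 then result' else pvLoopA largest' smallest' remainder' result'
termination_by if remainder = 0 then smallest.natAbs + 1 else remainder.natAbs
decreasing_by
  rename_i h
  have h' : PySem.Int.mod smallest remainder ≠ 0 := h
  by_cases hz : remainder = 0
  · subst hz
    rw [pv_mod_zero] at h'
    rw [pv_mod_zero]
    split_ifs <;> omega
  · have hlt := pv_mod_natAbs_lt smallest remainder hz
    split_ifs <;> omega

def gcd_steps_py (number1 : Int) (number2 : Int) : List (Int × Int × Int × Int) :=
  let largest_number := max number1 number2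
  let smallest_number := min number1 number2
  let quotient := PySem.Int.floordiv largest_number smallest_number
  let remainder := PySem.Int.mod largest_number smallest_number
  let result := [(largest_number, quotient, smallest_number, remainder)]
  if remainder = 0 then result else pvLoopA largest_number smallest_number remainder result

-- ===== PORT B =====
def pvSteps (a b : Int) : List (Int × Int × Int × Int) :=
  let q := PySem.Int.floordiv a b
  let r := PySem.Int.mod a b
  if r = 0 then [(a, q, b, r)] else (a, q, b, r) :: pvSteps b r
termination_by if b = 0 then a.natAbs + 1 else b.natAbs
decreasing_by
  rename_i h
  have h' : PySem.Int.mod a b ≠ 0 := h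
  by_cases hz : b = 0
  · subst hz
    rw [pv_mod_zero] at h'
    rw [pv_mod_zero]
    split_ifs <;> omega
  · have hlt := pv_mod_natAbs_lt a b hz
    split_ifs <;> omega

def gcd_steps_py_alt (number1 : Int) (number2 : Int) : List (Int × Int × Int × Int) :=
  pvSteps (max number1 number2) (min number1 number2)

-- ===== PRECONDITION & SPEC =====
-- Pre_ excludes exactly the inputs where Python A raises: (0,0) (ValueError) and
-- min(number1,number2) = 0 (ZeroDivisionError); min = 0 covers both.
def Pre_gcd_steps_py (number1 : Int) (number2 : Int) : Prop := min number1 number2 ≠ 0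
instance (number1 : Int) (number2 : Int) : Decidable (Pre_gcd_steps_py number1 number2) := by unfold Pre_gcd_steps_py; infer_instance
def pvWitness_gcd_steps_py : Int × Int := (12, 18)

def Spec_gcd_steps_py (number1 : Int) (number2 : Int) (out : List (Int × Int × Int × Int)) : Prop := out = gcd_steps_py_alt number1 number2
instance (number1 : Int) (number2 : Int) (out : List (Int × Int × Int × Int)) : Decidable (Spec_gcd_steps_py number1 number2 out) := by unfold Spec_gcd_steps_py; infer_instance

-- ===== CLAIM (what is proved, stated in full; the proofs are below) =====
def Claim_equal_gcd_steps_py : Prop := ∀ (number1 : Int) (number2 : Int), Dom_gcd_steps_py number1 number2 → Pre_gcd_steps_py number1 number2 → Spec_gcd_steps_py number1 number2 (gcd_steps_py number1 number2)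

-- ===== LEMMAS AND PROOFS =====
-- A's loop, started with divisor pair (a, b), produces acc ++ the recursive step list of (a, b).
theorem pvLoopA_eq_steps (a b : Int) :
    ∀ (x : Int) (acc : List (Int × Int × Int × Int)),
      pvLoopA x a b acc = acc ++ pvSteps a b := by
  induction a, b using pvSteps.induct with
  | case1 a b r hr =>
    intro x acc
    rw [pvLoopA, pvSteps]
    have hr' : PySem.Int.mod a b = 0 := hr
    simp [hr']
  | case2 a b r hr ih =>
    intro x acc
    rw [pvLoopA]
    conv_rhs => rw [pvSteps]
    simp only [show r = PySem.Int.mod a b from rfl] at ih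
    have hr' : PySem.Int.mod a b ≠ 0 := hr
    simp [hr', ih]

-- ===== VERDICT (by name: the statement is the Claim_ definition above) =====
theorem gcd_steps_py_spec : Claim_equal_gcd_steps_py := by
  intro number1 number2 _ _
  unfold Spec_gcd_steps_py gcd_steps_py gcd_steps_py_alt
  simp only []
  by_cases hr : PySem.Int.mod (max number1 number2) (min number1 number2) = 0
  · rw [pvSteps]
    simp [hr]
  · rw [pvLoopA_eq_steps]
    conv_rhs => rw [pvSteps]
    simp [hr]
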